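-- pv_equiv track=rewrite | github.com/bghira/text-game-engine | src/text_game_engine/backends/prompt_formatting.py | _wrap_examples_for_claude
-- ===== SOURCE A (Python) =====
-- def _wrap_examples_for_claude(text: str) -> str:
--     lines = str(text or "").splitlines()
--     if not lines:
--         return ""
--     out: list[str] = []
--     example_buf: list[str] = []
--
--     def flush() -> None:
--         if not example_buf:
--             return
--         content = "\n".join(example_buf).strip()
--         if content:
--             out.append("<example>")
--             out.append(content)
--             out.append("</example>")
--         example_buf.clear()
--
--     for raw_line in lines:
--         line = str(raw_line or "")
--         if _is_example_line(line):
--             example_buf.append(line)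
--             continue
--         flush()
--         out.append(line)
--     flush()
--     return "\n".join(out).strip()
--
-- def _is_example_line(line: str) -> bool:
--     text = str(line or "").strip()
--     if not text:
--         return False
--     if text.startswith(("Example:", "Examples:", "NOT:", "Output format:")):
--         return True
--     if text.startswith("{") and text.endswith("}"):
--         return True
--     if text.startswith('{"tool_call"'):
--         return True
--     return False
-- ===== SOURCE B (Python) =====
-- def _is_example_line(line: str) -> bool:
--     text = str(line or "").strip()
--     if not text:
--         return False
--     if text.startswith(("Example:", "Examples:", "NOT:", "Output format:")):
--         return True
--     if text.startswith("{") and text.endswith("}"):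
--         return True
--     if text.startswith('{"tool_call"'):
--         return True
--     return False
--
--
-- def _wrap_examples_for_claude(text: str) -> str:
--     # run-scanning decomposition: split the lines into maximal consecutive runs
--     # with the same _is_example_line flag, then render each run at once
--     lines = [str(l or "") for l in str(text or "").splitlines()]
--     if not lines:
--         return ""
--     out: list[str] = []
--     i, n = 0, len(lines)
--     while i < n:
--         flag = _is_example_line(lines[i])
--         j = i + 1
--         while j < n and _is_example_line(lines[j]) == flag:
--             j += 1
--         group = lines[i:j]
--         if flag:
--             content = "\n".join(group).strip()
--             if content:
--                 out += ["<example>", content, "</example>"]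
--         else:
--             out += group
--         i = j
--     return "\n".join(out).strip()
-- ===== Notes on version B (the rewrite author's own statement) =====
-- stated objective: alternative
-- what changed: Replaced A's buffer/flush state machine (mutable example_buf flushed on each non-example line) with a run-scanning pass that extracts each maximal consecutive run of lines with equal _is_example_line flag and renders it at once.
import Mathlib
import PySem

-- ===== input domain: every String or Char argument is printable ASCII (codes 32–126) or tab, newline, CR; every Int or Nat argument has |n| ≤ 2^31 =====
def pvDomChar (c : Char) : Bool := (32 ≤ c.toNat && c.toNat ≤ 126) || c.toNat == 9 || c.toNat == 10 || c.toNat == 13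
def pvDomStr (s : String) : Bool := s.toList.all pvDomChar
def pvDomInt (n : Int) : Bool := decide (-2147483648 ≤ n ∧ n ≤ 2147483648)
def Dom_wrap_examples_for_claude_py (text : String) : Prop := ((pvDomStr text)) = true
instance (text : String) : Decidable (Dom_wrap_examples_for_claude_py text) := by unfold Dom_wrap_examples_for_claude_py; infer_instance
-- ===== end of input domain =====

-- B replaces A's buffer/flush state machine by a two-level run-scanning pass
-- (group consecutive lines with equal _is_example_line flag, render each run at once);
-- objective: alternative decomposition, same cost.


-- ===== PORT A =====
-- shared same-module helper _is_example_line (used by both Pythons)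
def isExampleLine (line : String) : Bool :=
  let text := PySem.Str.strip (if line == "" then "" else line)
  if text == "" then false
  else if PySem.Str.startswith text "Example:" || PySem.Str.startswith text "Examples:" ||
          PySem.Str.startswith text "NOT:" || PySem.Str.startswith text "Output format:" then true
  else if PySem.Str.startswith text "{" && PySem.Str.endswith text "}" then true
  else if PySem.Str.startswith text "{\"tool_call\"" then true
  else false

-- A's local 'flush' on the state (out, example_buf)
def flushA (st : List String × List String) : List String × List String :=
  if st.2 = [] then st
  else
    let content := PySem.Str.strip (PySem.Str.join "\n" st.2)
    if content ≠ "" then (st.1 ++ ["<example>", content, "</example>"], [])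
    else (st.1, [])

-- A's loop body over one raw line
def stepA (st : List String × List String) (raw : String) : List String × List String :=
  let line := if raw == "" then "" else raw
  if isExampleLine line then (st.1, st.2 ++ [line])
  else
    let st' := flushA st
    (st'.1 ++ [line], st'.2)

def wrap_examples_for_claude_py (text : String) : String :=
  let lines := PySem.Str.splitlines (if text == "" then "" else text)
  if lines = [] then ""
  else
    let st := lines.foldl stepA ([], [])
    let st := flushA st
    PySem.Str.strip (PySem.Str.join "\n" st.1)

-- ===== PORT B =====
-- B's run extraction: maximal consecutive runs with equal isExampleLine flag
def pyRuns (key : String → Bool) : List String → List (Bool × List String)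
  | [] => []
  | x :: xs =>
    (key x, x :: xs.takeWhile (fun y => key y == key x)) ::
      pyRuns key (xs.dropWhile (fun y => key y == key x))
termination_by l => l.length
decreasing_by
  simp only [List.length_cons]
  exact Nat.lt_succ_of_le (List.length_dropWhile_le _ _)

-- B's rendering of one run
def stepB (out : List String) (g : Bool × List String) : List String :=
  if g.1 then
    let content := PySem.Str.strip (PySem.Str.join "\n" g.2)
    if content ≠ "" then out ++ ["<example>", content, "</example>"] else out
  else out ++ g.2

def wrap_examples_for_claude_py_alt (text : String) : String :=
  let lines := (PySem.Str.splitlines (if text == "" then "" else text)).map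
    (fun l => if l == "" then "" else l)
  if lines = [] then ""
  else
    PySem.Str.strip (PySem.Str.join "\n" ((pyRuns isExampleLine lines).foldl stepB []))

-- ===== PRECONDITION & SPEC =====
def Spec_wrap_examples_for_claude_py (text : String) (out : String) : Prop := out = wrap_examples_for_claude_py_alt text
instance (text : String) (out : String) : Decidable (Spec_wrap_examples_for_claude_py text out) := by unfold Spec_wrap_examples_for_claude_py; infer_instance

-- ===== CLAIM (what is proved, stated in full; the proofs are below) =====
def Claim_equal_wrap_examples_for_claude_py : Prop := ∀ (text : String), Dom_wrap_examples_for_claude_py text → Spec_wrap_examples_for_claude_py text (wrap_examples_for_claude_py text)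

-- ===== LEMMAS AND PROOFS =====
theorem orEmpty_id (s : String) : (if s == "" then "" else s) = s := by
  by_cases h : s = "" <;> simp [h]

theorem flushA_nil (out : List String) : flushA (out, []) = (out, []) := by
  simp [flushA]

theorem flushA_snd (st : List String × List String) : (flushA st).2 = [] := by
  unfold flushA
  split
  · assumption
  · dsimp only
    split <;> rfl

theorem stepA_eq (st : List String × List String) (raw : String) :
    stepA st raw = if isExampleLine raw then (st.1, st.2 ++ [raw])
                   else ((flushA st).1 ++ [raw], []) := by
  unfold stepA
  rw [orEmpty_id]
  split <;> simp_all [flushA_snd]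

theorem flushA_fst_cons (out : List String) (b : String) (buf : List String) :
    (flushA (out, b :: buf)).1 = stepB out (true, b :: buf) := by
  simp [flushA, stepB]
  split <;> rfl

theorem foldl_true (g : List String) (out buf : List String)
    (h : ∀ y ∈ g, isExampleLine y = true) :
    g.foldl stepA (out, buf) = (out, buf ++ g) := by
  induction g generalizing buf with
  | nil => simp
  | cons y ys ih =>
    rw [List.foldl_cons, stepA_eq, if_pos (by simp [h y (by simp)] : (isExampleLine y = true)),
        ih _ (fun z hz => h z (by simp [hz]))]
    simp

theorem foldl_false (g : List String) (out : List String)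
    (h : ∀ y ∈ g, isExampleLine y = false) :
    g.foldl stepA (out, []) = (out ++ g, []) := by
  induction g generalizing out with
  | nil => simp
  | cons y ys ih =>
    rw [List.foldl_cons, stepA_eq, if_neg (by simp [h y (by simp)]), flushA_nil,
        ih _ (fun z hz => h z (by simp [hz]))]
    simp

theorem dropWhile_head_false {p : String → Bool} :
    ∀ (l : List String) (y : String) (ys : List String),
      l.dropWhile p = y :: ys → p y = false := by
  intro l
  induction l with
  | nil => intro y ys h; simp [List.dropWhile] at h
  | cons a as ih =>
    intro y ys h
    by_cases hp : p a
    · exact ih y ys (by simpa [List.dropWhile, hp] using h)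
    · simp [List.dropWhile, hp] at h
      simp [← h.1]; simpa using hp

theorem main_lemma : ∀ (n : Nat) (lines : List String), lines.length ≤ n → ∀ (out : List String),
    (flushA (lines.foldl stepA (out, []))).1
      = (pyRuns isExampleLine lines).foldl stepB out := by
  intro n
  induction n with
  | zero =>
    intro lines h out
    have : lines = [] := by cases lines <;> simp_all
    simp [this, pyRuns, flushA_nil]
  | succ n ih =>
    intro lines h out
    match lines with
    | [] => simp [pyRuns, flushA_nil]
    | x :: xs =>
      have hlen : xs.length ≤ n := by simpa using h
      have hrest : (xs.dropWhile (fun y => isExampleLine y == isExampleLine x)).length ≤ n :=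
        le_trans (List.length_dropWhile_le _ _) hlen
      rw [pyRuns]
      have hsplit : xs = xs.takeWhile (fun y => isExampleLine y == isExampleLine x)
          ++ xs.dropWhile (fun y => isExampleLine y == isExampleLine x) :=
        (List.takeWhile_append_dropWhile (p := fun y => isExampleLine y == isExampleLine x) (l := xs)).symm
      set g := xs.takeWhile (fun y => isExampleLine y == isExampleLine x) with hg
      set rest := xs.dropWhile (fun y => isExampleLine y == isExampleLine x) with hr
      have hgmem : ∀ y ∈ g, isExampleLine y = isExampleLine x := by
        intro y hy
        have := List.mem_takeWhile_imp (l := xs) hy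
        simpa using this
      cases hx : isExampleLine x with
      | false =>
        have hfold : (x :: xs).foldl stepA (out, []) = rest.foldl stepA (out ++ x :: g, []) := by
          conv_lhs => rw [show (x :: xs) = (x :: g) ++ rest by rw [hsplit]; rfl]
          rw [List.foldl_append]
          rw [foldl_false (x :: g) out (by
            intro y hy
            rcases List.mem_cons.mp hy with h1 | h1
            · simpa [h1] using hx
            · rw [hgmem y h1, hx])]
        rw [hfold, ih rest hrest (out ++ x :: g)]
        simp [stepB]
      | true =>
        have hfold : (x :: xs).foldl stepA (out, []) = rest.foldl stepA (out, x :: g) := by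
          conv_lhs => rw [show (x :: xs) = (x :: g) ++ rest by rw [hsplit]; rfl]
          rw [List.foldl_append]
          rw [foldl_true (x :: g) out [] (by
            intro y hy
            rcases List.mem_cons.mp hy with h1 | h1
            · simpa [h1] using hx
            · rw [hgmem y h1, hx])]
          simp
        rw [hfold]
        cases hre : rest with
        | nil =>
          simp [pyRuns, flushA_fst_cons]
        | cons y ys =>
          have hy : isExampleLine y = false := by
            have := dropWhile_head_false (p := fun y => isExampleLine y == isExampleLine x) xs y ys (hr ▸ hre)
            simpa [hx] using this
          have h1 : (y :: ys).foldl stepA (out, x :: g)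
              = ys.foldl stepA ((flushA (out, x :: g)).1 ++ [y], []) := by
            simp [List.foldl_cons, stepA_eq, hy]
          have h2 : (y :: ys).foldl stepA ((flushA (out, x :: g)).1, [])
              = ys.foldl stepA ((flushA (out, x :: g)).1 ++ [y], []) := by
            simp [List.foldl_cons, stepA_eq, hy, flushA_nil]
          rw [h1, ← h2,
            ih (y :: ys) (hre ▸ hrest) ((flushA (out, x :: g)).1),
            flushA_fst_cons, List.foldl_cons]

-- ===== VERDICT (by name: the statement is the Claim_ definition above) =====
theorem wrap_examples_for_claude_py_spec : Claim_equal_wrap_examples_for_claude_py := by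
  intro text _
  unfold Spec_wrap_examples_for_claude_py wrap_examples_for_claude_py wrap_examples_for_claude_py_alt
  simp only [orEmpty_id, List.map_id']
  split
  · rfl
  · rw [main_lemma (PySem.Str.splitlines text).length _ le_rfl]
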